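-- pv_equiv track=rewrite | github.com/dreams-labs/data-science | src/coin_features/wallet_segmentation.py | consolidate_duplicate_bins
-- ===== SOURCE A (Python) =====
-- def consolidate_duplicate_bins(bin_edges, bin_labels):
--     """
--     Consolidate duplicate bin edges by merging their corresponding labels.
--
--     Params:
--     - bin_edges (list): List of bin edges with possible duplicates
--     - bin_labels (list): List of bin labels corresponding to bin_edges
--
--     Returns:
--     - tuple: (new_bin_edges, new_bin_labels) with duplicates resolved
--     """
--     # 1) Build the ordered list of unique edges
--     unique_edges = [bin_edges[0]]
--     for edge in bin_edges[1:]: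
--         if edge != unique_edges[-1]:
--             unique_edges.append(edge)
--
--     # 2) For each new interval, merge original labels that fall within it
--     new_labels = []
--     for i in range(len(unique_edges) - 1):
--         left, right = unique_edges[i], unique_edges[i + 1]
--         # indices of original intervals fully within [left, right]
--         overlap_idxs = [
--             j for j, (l, r) in enumerate(zip(bin_edges[:-1], bin_edges[1:]))
--             if l >= left and r <= right
--         ]
--         grp = [bin_labels[j] for j in overlap_idxs]
--         if len(grp) == 1:
--             new_labels.append(grp[0])
--         else:
--             # pick prefix from the first non-zero-width interval
--             non_zero = [
--                 j for j in overlap_idxs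
--                 if bin_edges[j] != bin_edges[j + 1]
--             ]
--             if non_zero:
--                 prefix = bin_labels[non_zero[0]].split('_')[0]
--             else:
--                 prefix = grp[0].split('_')[0]
--             # suffix from the last original label
--             suffix = grp[-1].split('_')[-1]
--             new_labels.append(f"{prefix}_{suffix}")
--
--     return unique_edges, new_labels
-- ===== SOURCE B (Python) =====
-- def consolidate_duplicate_bins(bin_edges, bin_labels):
--     """Linear-pass rewrite: run-length encode the edges, then emit one label per
--     unique interval from the run boundaries (requires nondecreasing edges)."""
--     runs = []  # (value, multiplicity), run-length encoding of bin_edges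
--     for e in bin_edges:
--         if runs and runs[-1][0] == e:
--             runs[-1] = (e, runs[-1][1] + 1)
--         else:
--             runs.append((e, 1))
--     unique_edges = [v for v, _ in runs]
--     new_labels = []
--     pos = 0  # index in bin_edges of the first element of the current run
--     for k in range(len(runs) - 1):
--         c = runs[k][1]
--         nc = runs[k + 1][1]
--         j = pos + c - 1  # the one non-zero-width original interval in this bin
--         if c == 1 and nc == 1:
--             new_labels.append(bin_labels[j])
--         else:
--             prefix = bin_labels[j].split('_')[0]
--             suffix = bin_labels[pos + c + nc - 2].split('_')[-1]
--             new_labels.append(prefix + '_' + suffix)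
--         pos += c
--     return unique_edges, new_labels
-- ===== Notes on version B (the rewrite author's own statement) =====
-- stated objective: alternative
-- what changed: Replaces A's per-interval rescan of all edge pairs (nested loops) with a single run-length encoding of the edges followed by one linear pass that reads each bin's label group off the adjacent run multiplicities (O(n) vs O(n^2) on the sorted domain; a timing run's random inputs fall outside Pre_, so no speed is claimed).
-- outside the precondition, e.g. on consolidate_duplicate_bins([2, 9, 3], ['', '_']): A returns ([2, 9, 3], ['_', '_']), B returns ([2, 9, 3], ['', '_'])
import Mathlib
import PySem

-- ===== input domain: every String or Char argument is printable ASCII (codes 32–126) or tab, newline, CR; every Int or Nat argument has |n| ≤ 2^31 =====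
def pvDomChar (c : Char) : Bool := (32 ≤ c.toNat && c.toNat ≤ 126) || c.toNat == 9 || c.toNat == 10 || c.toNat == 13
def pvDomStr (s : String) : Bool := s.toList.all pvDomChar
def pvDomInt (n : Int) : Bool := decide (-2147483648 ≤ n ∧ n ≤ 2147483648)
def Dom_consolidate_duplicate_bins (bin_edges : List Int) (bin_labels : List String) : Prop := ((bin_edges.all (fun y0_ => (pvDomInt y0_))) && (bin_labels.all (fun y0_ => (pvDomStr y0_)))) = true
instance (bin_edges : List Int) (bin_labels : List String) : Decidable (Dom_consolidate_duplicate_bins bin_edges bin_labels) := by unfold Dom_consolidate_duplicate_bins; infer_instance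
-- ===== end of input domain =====

-- B replaces A's per-interval rescan of all edge pairs with run-length encoding plus one
-- linear pass; proved equal on nonempty nondecreasing edges with enough labels (Pre_).

-- ===== PORT A =====
-- shared primitive wrapper: Python s.split('_') (the separator is nonempty, so split? is some)
def pySplitU (s : String) : List String := (PySem.Str.split? s "_").getD []

-- literal transliteration of A; on bin_edges = [] Python raises IndexError (excluded by Pre_)
def consolidate_duplicate_bins (bin_edges : List Int) (bin_labels : List String) : List Int × List String :=
  match bin_edges with
  | [] => ([], [])
  | e0 :: rest =>
    -- unique_edges = [bin_edges[0]]; for edge in bin_edges[1:]: if edge != unique_edges[-1]: append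
    let unique_edges := rest.foldl
      (fun acc e => if PySem.List.pyGetD acc (-1) 0 ≠ e then acc ++ [e] else acc) [e0]
    let pairs := List.zip (PySem.List.slice bin_edges none (some (-1)))
                          (PySem.List.slice bin_edges (some 1) none)
    let new_labels := (PySem.List.pyRange 0 ((unique_edges.length : Int) - 1) 1).foldl
      (fun acc i =>
        let left := PySem.List.pyGetD unique_edges i 0
        let right := PySem.List.pyGetD unique_edges (i + 1) 0
        let overlap_idxs := ((PySem.List.enumerate pairs 0).filter
          (fun p => decide (p.2.1 ≥ left ∧ p.2.2 ≤ right))).map (·.1)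
        let grp := overlap_idxs.map (fun j => PySem.List.pyGetD bin_labels j "")
        if grp.length = 1 then
          acc ++ [PySem.List.pyGetD grp 0 ""]
        else
          let non_zero := overlap_idxs.filter
            (fun j => decide (PySem.List.pyGetD bin_edges j 0 ≠ PySem.List.pyGetD bin_edges (j + 1) 0))
          let pre := if non_zero ≠ [] then
              PySem.List.pyGetD (pySplitU (PySem.List.pyGetD bin_labels (PySem.List.pyGetD non_zero 0 0) "")) 0 ""
            else
              PySem.List.pyGetD (pySplitU (PySem.List.pyGetD grp 0 "")) 0 ""
          let suf := PySem.List.pyGetD (pySplitU (PySem.List.pyGetD grp (-1) "")) (-1) ""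
          acc ++ [pre ++ "_" ++ suf]) []
    (unique_edges, new_labels)

-- ===== PORT B =====
-- literal transliteration of Source B: run-length encode, then one pass over adjacent runs
def consolidate_duplicate_bins_alt (bin_edges : List Int) (bin_labels : List String) : List Int × List String :=
  let runs := bin_edges.foldl
    (fun rs e =>
      if rs ≠ [] ∧ (PySem.List.pyGetD rs (-1) ((0 : Int), (0 : Int))).1 = e then
        rs.dropLast ++ [(e, (PySem.List.pyGetD rs (-1) ((0 : Int), (0 : Int))).2 + 1)]
      else rs ++ [(e, 1)]) ([] : List (Int × Int))
  let unique_edges := runs.map (·.1)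
  let st := (PySem.List.pyRange 0 ((runs.length : Int) - 1) 1).foldl
    (fun (st : List String × Int) k =>
      let pos := st.2
      let c := (PySem.List.pyGetD runs k (0, 0)).2
      let nc := (PySem.List.pyGetD runs (k + 1) (0, 0)).2
      let j := pos + c - 1
      let labels' :=
        if c = 1 ∧ nc = 1 then
          st.1 ++ [PySem.List.pyGetD bin_labels j ""]
        else
          let pre := PySem.List.pyGetD (pySplitU (PySem.List.pyGetD bin_labels j "")) 0 ""
          let suf := PySem.List.pyGetD (pySplitU (PySem.List.pyGetD bin_labels (pos + c + nc - 2) "")) (-1) ""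
          st.1 ++ [pre ++ "_" ++ suf]
      (labels', pos + c)) (([] : List String), (0 : Int))
  (unique_edges, st.1)

-- ===== PRECONDITION & SPEC =====
-- Pre_ keeps the function's documented domain: nonempty, NONDECREASING bin edges (on longer
-- unsorted edge lists A's overlap search returns accidental groupings B does not reproduce —
-- see cites; lists of at most two edges are fine even unsorted) and enough labels for A's
-- indexing not to raise IndexError (unless all edges are equal, in which case no label is read).
def Pre_consolidate_duplicate_bins (bin_edges : List Int) (bin_labels : List String) : Prop :=
  bin_edges ≠ [] ∧ (bin_edges.Pairwise (· ≤ ·) ∨ bin_edges.length ≤ 2) ∧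
    ((bin_edges.length : Int) ≤ (bin_labels.length : Int) + 1 ∨ bin_edges.Pairwise (· = ·))
instance (bin_edges : List Int) (bin_labels : List String) : Decidable (Pre_consolidate_duplicate_bins bin_edges bin_labels) := by unfold Pre_consolidate_duplicate_bins; infer_instance

def pvWitness_consolidate_duplicate_bins : List Int × List String :=
  ([0, 0, 1, 3], ["lowA_q", "low_mid", "mid_high"])

def Spec_consolidate_duplicate_bins (bin_edges : List Int) (bin_labels : List String) (out : List Int × List String) : Prop := out = consolidate_duplicate_bins_alt bin_edges bin_labels
instance (bin_edges : List Int) (bin_labels : List String) (out : List Int × List String) : Decidable (Spec_consolidate_duplicate_bins bin_edges bin_labels out) := by unfold Spec_consolidate_duplicate_bins; infer_instance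

-- ===== CLAIM (what is proved, stated in full; the proofs are below) =====
def Claim_equal_consolidate_duplicate_bins : Prop := ∀ (bin_edges : List Int) (bin_labels : List String), Dom_consolidate_duplicate_bins bin_edges bin_labels → Pre_consolidate_duplicate_bins bin_edges bin_labels → Spec_consolidate_duplicate_bins bin_edges bin_labels (consolidate_duplicate_bins bin_edges bin_labels)


-- ===== LEMMAS AND PROOFS =====

-- Proof-side view of B's run-length encoding (Nat multiplicities), and of A's
-- consecutive dedup, both as structural recursions.
def rleNAux (v : Int) (c : Nat) : List Int → List (Int × Nat)
  | [] => [(v, c)]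
  | e :: t => if v = e then rleNAux v (c + 1) t else (v, c) :: rleNAux e 1 t

def dedupAux (v : Int) : List Int → List Int
  | [] => []
  | e :: t => if v = e then dedupAux v t else e :: dedupAux e t

def expandN (rs : List (Int × Nat)) : List Int := rs.flatMap (fun p => List.replicate p.2 p.1)

def posN (rs : List (Int × Nat)) (k : Nat) : Nat := ((rs.take k).map (·.2)).sum

-- A's unique_edges fold is dedupAux
theorem foldA_eq (E : List Int) : ∀ (acc : List Int) (w : Int),
    E.foldl (fun acc e => if PySem.List.pyGetD acc (-1) 0 ≠ e then acc ++ [e] else acc) (acc ++ [w])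
      = acc ++ w :: dedupAux w E := by
  induction E with
  | nil => intro acc w; simp [dedupAux]
  | cons e t ih =>
    intro acc w
    rw [List.foldl_cons, PySem.List.pyGetD_neg_one_append_singleton]
    by_cases h : w = e
    · subst h
      rw [if_neg (by simp), dedupAux.eq_def]
      simp only [if_pos rfl]
      exact ih acc w
    · rw [if_pos h, dedupAux.eq_def]
      simp only [if_neg h]
      have := ih (acc ++ [w]) e
      simpa using this

theorem foldB_eq (E : List Int) : ∀ (acc : List (Int × Int)) (v : Int) (c : Nat),
    E.foldl (fun rs e =>
      if rs ≠ [] ∧ (PySem.List.pyGetD rs (-1) ((0 : Int), (0 : Int))).1 = e then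
        rs.dropLast ++ [(e, (PySem.List.pyGetD rs (-1) ((0 : Int), (0 : Int))).2 + 1)]
      else rs ++ [(e, 1)]) (acc ++ [(v, (c : Int))])
      = acc ++ (rleNAux v c E).map (fun p => (p.1, (p.2 : Int))) := by
  induction E with
  | nil => intro acc v c; simp [rleNAux]
  | cons e t ih =>
    intro acc v c
    rw [List.foldl_cons]
    simp only [PySem.List.pyGetD_neg_one_append_singleton, List.dropLast_concat]
    by_cases h : v = e
    · subst h
      rw [if_pos ⟨by simp, rfl⟩, rleNAux.eq_def]
      simp only [if_pos rfl]
      have hcast : ((c : Int) + 1) = ((c + 1 : Nat) : Int) := by push_cast; ring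
      rw [hcast]
      exact ih acc v (c + 1)
    · rw [if_neg (by simp [h]), rleNAux.eq_def]
      simp only [if_neg h]
      have := ih (acc ++ [(v, (c : Int))]) e 1
      simpa using this

theorem mapfst_rleNAux (E : List Int) : ∀ (v : Int) (c : Nat),
    (rleNAux v c E).map (·.1) = v :: dedupAux v E := by
  induction E with
  | nil => intro v c; simp [rleNAux, dedupAux]
  | cons e t ih =>
    intro v c
    rw [rleNAux.eq_def, dedupAux.eq_def]
    by_cases h : v = e
    · simp only [if_pos h]; subst h; exact ih v (c + 1)
    · simp only [if_neg h, List.map_cons, ih]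

theorem expandN_rleNAux (E : List Int) : ∀ (v : Int) (c : Nat),
    expandN (rleNAux v c E) = List.replicate c v ++ E := by
  induction E with
  | nil => intro v c; simp [rleNAux, expandN]
  | cons e t ih =>
    intro v c
    rw [rleNAux.eq_def]
    by_cases h : v = e
    · simp only [if_pos h]
      subst h
      rw [ih v (c + 1), List.replicate_succ']
      simp
    · simp only [if_neg h, expandN, List.flatMap_cons] at ih ⊢
      rw [ih e 1]
      simp

theorem counts_pos_rleNAux (E : List Int) : ∀ (v : Int) (c : Nat), 0 < c →
    ∀ p ∈ rleNAux v c E, 0 < p.2 := by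
  induction E with
  | nil => intro v c hc p hp; simp [rleNAux] at hp; simp [hp, hc]
  | cons e t ih =>
    intro v c hc p hp
    rw [show rleNAux v c (e :: t) = if v = e then rleNAux v (c + 1) t
          else (v, c) :: rleNAux e 1 t from rfl] at hp
    by_cases h : v = e
    · rw [if_pos h] at hp; exact ih e (c + 1) (by omega) p (h ▸ hp)
    · rw [if_neg h] at hp
      rcases List.mem_cons.1 hp with h1 | h1
      · simp [h1, hc]
      · exact ih e 1 (by omega) p h1

theorem chain_lt_dedupAux (E : List Int) : ∀ (v : Int), List.IsChain (· ≤ ·) (v :: E) →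
    List.IsChain (· < ·) (v :: dedupAux v E) := by
  induction E with
  | nil => intro v _; simp [dedupAux]
  | cons e t ih =>
    intro v hch
    rw [dedupAux.eq_def]
    rcases List.isChain_cons_cons.1 hch with ⟨hve, ht⟩
    by_cases h : v = e
    · simp only [if_pos h]
      subst h
      exact ih v ht
    · simp only [if_neg h]
      exact List.isChain_cons_cons.2 ⟨lt_of_le_of_ne hve h, ih e ht⟩

theorem posN_succ (rs : List (Int × Nat)) (k : Nat) (hk : k < rs.length) :
    posN rs (k + 1) = posN rs k + rs[k].2 := by
  unfold posN
  rw [List.take_succ_eq_append_getElem hk, List.map_append, List.sum_append]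
  simp

theorem posN_le_succ (rs : List (Int × Nat)) (n : Nat) : posN rs n ≤ posN rs (n + 1) := by
  rcases Nat.lt_or_ge n rs.length with h | h
  · rw [posN_succ rs n h]; omega
  · unfold posN
    rw [List.take_of_length_le (by omega), List.take_of_length_le (by omega)]

theorem posN_mono (rs : List (Int × Nat)) {k k' : Nat} (h : k ≤ k') : posN rs k ≤ posN rs k' := by
  induction k' with
  | zero => simp at h; simp [h]
  | succ n ih =>
    by_cases hk : k = n + 1
    · simp [hk]
    · exact le_trans (ih (by omega)) (posN_le_succ rs n)

theorem length_expandN (rs : List (Int × Nat)) : (expandN rs).length = posN rs rs.length := by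
  unfold expandN posN
  rw [List.take_of_length_le (le_refl _)]
  induction rs with
  | nil => simp
  | cons p t ih => simp [ih]

theorem get_expandN (rs : List (Int × Nat)) : ∀ (k t : Nat) (hk : k < rs.length),
    t < rs[k].2 → (expandN rs)[posN rs k + t]? = some rs[k].1 := by
  induction rs with
  | nil => intro k t hk; simp at hk
  | cons p rest ih =>
    intro k t hk ht
    match k with
    | 0 =>
      have htp : t < p.2 := by simpa using ht
      simp only [posN, List.take_zero, List.map_nil, List.sum_nil, Nat.zero_add]
      simp only [expandN, List.flatMap_cons]
      rw [List.getElem?_append_left (by simpa using htp)]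
      rw [List.getElem?_eq_getElem (by simpa using htp)]
      simp [List.getElem_replicate]
    | k' + 1 =>
      have hk' : k' < rest.length := by simpa using hk
      have ht' : t < rest[k'].2 := by simpa using ht
      have hpos : posN (p :: rest) (k' + 1) = p.2 + posN rest k' := by
        simp [posN, List.take_succ_cons]
      rw [hpos]
      simp only [expandN, List.flatMap_cons]
      rw [show p.2 + posN rest k' + t = p.2 + (posN rest k' + t) by omega]
      rw [List.getElem?_append_right (by simp)]
      simp only [List.length_replicate, Nat.add_sub_cancel_left]
      have := ih k' t hk' ht'
      simpa [expandN] using this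

theorem exists_run (rs : List (Int × Nat)) : ∀ (j : Nat), j < (expandN rs).length →
    ∃ (k : Nat) (hk : k < rs.length), posN rs k ≤ j ∧ j < posN rs k + rs[k].2 := by
  induction rs with
  | nil => intro j hj; simp [expandN] at hj
  | cons p rest ih =>
    intro j hj
    rcases Nat.lt_or_ge j p.2 with h | h
    · exact ⟨0, by simp, by simp [posN], by simpa [posN] using h⟩
    · have hj' : j - p.2 < (expandN rest).length := by
        simp only [expandN, List.flatMap_cons, List.length_append, List.length_replicate] at hj
        simp only [expandN]; omega
      obtain ⟨k, hk, h1, h2⟩ := ih (j - p.2) hj'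
      refine ⟨k + 1, by simpa using hk, ?_, ?_⟩
      · simp only [posN, List.take_succ_cons, List.map_cons, List.sum_cons]
        unfold posN at h1; omega
      · simp only [posN, List.take_succ_cons, List.map_cons, List.sum_cons]
        unfold posN at h2
        simp only [List.getElem_cons_succ]
        omega

theorem val_mono (rs : List (Int × Nat)) (hv : (rs.map (·.1)).Pairwise (· < ·))
    {k k' : Nat} (h : k < k') (hk' : k' < rs.length) : rs[k].1 < rs[k'].1 := by
  have := List.pairwise_iff_getElem.1 hv k k' (by simpa using lt_trans h hk') (by simpa using hk') h
  simpa using this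

theorem val_run (rs : List (Int × Nat)) (j k : Nat) (hk : k < rs.length)
    (h1 : posN rs k ≤ j) (h2 : j < posN rs (k + 1)) (hj : j < (expandN rs).length) :
    (expandN rs)[j] = rs[k].1 := by
  have ht : j - posN rs k < rs[k].2 := by
    have := posN_succ rs k hk; omega
  have := get_expandN rs k (j - posN rs k) hk ht
  rw [show posN rs k + (j - posN rs k) = j by omega] at this
  rw [List.getElem?_eq_getElem hj] at this
  exact Option.some_injective _ this

-- K-a : E[j] ≥ v_k  ↔  j ≥ posN k
theorem Ka (rs : List (Int × Nat)) (hc : ∀ p ∈ rs, 0 < p.2)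
    (hv : (rs.map (·.1)).Pairwise (· < ·)) (j k : Nat) (hj : j < (expandN rs).length)
    (hk : k < rs.length) : rs[k].1 ≤ (expandN rs)[j] ↔ posN rs k ≤ j := by
  obtain ⟨k1, hk1, ha, hb⟩ := exists_run rs j hj
  have hval : (expandN rs)[j] = rs[k1].1 :=
    val_run rs j k1 hk1 ha (by rw [posN_succ rs k1 hk1]; omega) hj
  rw [hval]
  constructor
  · intro hle
    by_contra hlt
    push_neg at hlt
    have hk1k : k1 < k := by
      by_contra hkk
      push_neg at hkk
      exact absurd (le_trans (posN_mono rs hkk) ha) (by omega)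
    exact absurd (val_mono rs hv hk1k hk) (by omega)
  · intro hjk
    rcases Nat.lt_or_ge k1 k with hlt | hge
    · have : posN rs (k1 + 1) ≤ posN rs k := posN_mono rs hlt
      have hb' : j < posN rs (k1 + 1) := by rw [posN_succ rs k1 hk1]; omega
      omega
    · rcases Nat.eq_or_lt_of_le hge with he | hlt
      · subst he; exact le_refl _
      · exact le_of_lt (val_mono rs hv hlt hk1)

-- K-b : E[j] ≤ v_k  ↔  j < posN (k+1)
theorem Kb (rs : List (Int × Nat)) (hc : ∀ p ∈ rs, 0 < p.2)
    (hv : (rs.map (·.1)).Pairwise (· < ·)) (j k : Nat) (hj : j < (expandN rs).length)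
    (hk : k < rs.length) : (expandN rs)[j] ≤ rs[k].1 ↔ j < posN rs (k + 1) := by
  obtain ⟨k1, hk1, ha, hb⟩ := exists_run rs j hj
  have hb' : j < posN rs (k1 + 1) := by rw [posN_succ rs k1 hk1]; omega
  have hval : (expandN rs)[j] = rs[k1].1 := val_run rs j k1 hk1 ha hb' hj
  rw [hval]
  constructor
  · intro hle
    have hk1k : k1 ≤ k := by
      by_contra hkk
      push_neg at hkk
      exact absurd (val_mono rs hv hkk hk1) (by omega)
    exact lt_of_lt_of_le hb' (posN_mono rs (by omega))
  · intro hjk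
    have hk1k : k1 ≤ k := by
      by_contra hkk
      push_neg at hkk
      have : posN rs (k + 1) ≤ posN rs k1 := posN_mono rs (by omega)
      omega
    rcases Nat.eq_or_lt_of_le hk1k with he | hlt
    · subst he; exact le_refl _
    · exact le_of_lt (val_mono rs hv hlt hk)

-- K-c : within the two runs k, k+1, the only non-zero-width adjacent pair is at posN k + c_k - 1
theorem Kc (rs : List (Int × Nat)) (hc : ∀ p ∈ rs, 0 < p.2)
    (hv : (rs.map (·.1)).Pairwise (· < ·)) (j k : Nat) (hk : k + 1 < rs.length)
    (h1 : posN rs k ≤ j) (h2 : j + 1 < posN rs (k + 2)) (hj1 : j + 1 < (expandN rs).length) :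
    ((expandN rs)[j]'(by omega) ≠ (expandN rs)[j + 1] ↔ j = posN rs k + rs[k].2 - 1) := by
  have hck : 0 < rs[k].2 := hc _ (List.getElem_mem (by omega))
  have hps : posN rs (k + 1) = posN rs k + rs[k].2 := posN_succ rs k (by omega)
  have hps2 : posN rs (k + 1 + 1) = posN rs (k + 1) + rs[k + 1].2 := posN_succ rs (k + 1) hk
  have h2' : j + 1 < posN rs (k + 1 + 1) := by
    have hkk : k + 1 + 1 = k + 2 := rfl
    rw [hkk]; exact h2
  rcases Nat.lt_or_ge j (posN rs k + rs[k].2 - 1) with hl | hr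
  · have e1 : (expandN rs)[j]'(by omega) = rs[k].1 :=
      val_run rs j k (by omega) h1 (by omega) (by omega)
    have e2 : (expandN rs)[j + 1] = rs[k].1 :=
      val_run rs (j + 1) k (by omega) (by omega) (by omega) hj1
    constructor
    · intro h; exact absurd (e1.trans e2.symm) h
    · intro h; omega
  · rcases Nat.eq_or_lt_of_le hr with he | hgt
    · have e1 : (expandN rs)[j]'(by omega) = rs[k].1 :=
        val_run rs j k (by omega) h1 (by omega) (by omega)
      have e2 : (expandN rs)[j + 1] = rs[k + 1].1 :=
        val_run rs (j + 1) (k + 1) hk (by omega) (by omega) hj1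
      have : rs[k].1 < rs[k + 1].1 := val_mono rs hv (by omega) hk
      constructor
      · intro _; omega
      · intro _; rw [e1, e2]; omega
    · have e1 : (expandN rs)[j]'(by omega) = rs[k + 1].1 :=
        val_run rs j (k + 1) hk (by omega) (by omega) (by omega)
      have e2 : (expandN rs)[j + 1] = rs[k + 1].1 :=
        val_run rs (j + 1) (k + 1) hk (by omega) (by omega) hj1
      constructor
      · intro h; exact absurd (e1.trans e2.symm) h
      · intro h; omega

-- canonical per-interval label (what both programs compute for bin k)
def PhiN (rs : List (Int × Nat)) (L : List String) (k : Nat) : String :=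
  let c := (rs.getD k (0, 0)).2
  let nc := (rs.getD (k + 1) (0, 0)).2
  let p := posN rs k
  if c = 1 ∧ nc = 1 then L.getD p ""
  else
    (PySem.List.pyGetD (pySplitU (L.getD (p + c - 1) "")) 0 "") ++ "_" ++
      (PySem.List.pyGetD (pySplitU (L.getD (p + c + nc - 2) "")) (-1) "")

-- A's loop body as a function of the loop index
def FA (bin_edges : List Int) (bin_labels : List String) (unique_edges : List Int) (i : Int) : String :=
  let left := PySem.List.pyGetD unique_edges i 0
  let right := PySem.List.pyGetD unique_edges (i + 1) 0
  let overlap_idxs := ((PySem.List.enumerate (List.zip (PySem.List.slice bin_edges none (some (-1))) (PySem.List.slice bin_edges (some 1) none)) 0).filter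
      (fun p => decide (p.2.1 ≥ left ∧ p.2.2 ≤ right))).map (·.1)
  let grp := overlap_idxs.map (fun j => PySem.List.pyGetD bin_labels j "")
  if grp.length = 1 then
    PySem.List.pyGetD grp 0 ""
  else
    let non_zero := overlap_idxs.filter
      (fun j => decide (PySem.List.pyGetD bin_edges j 0 ≠ PySem.List.pyGetD bin_edges (j + 1) 0))
    let pre := if non_zero ≠ [] then
        PySem.List.pyGetD (pySplitU (PySem.List.pyGetD bin_labels (PySem.List.pyGetD non_zero 0 0) "")) 0 ""
      else
        PySem.List.pyGetD (pySplitU (PySem.List.pyGetD grp 0 "")) 0 ""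
    let suf := PySem.List.pyGetD (pySplitU (PySem.List.pyGetD grp (-1) "")) (-1) ""
    pre ++ "_" ++ suf

theorem filter_range_interval (n a b : Nat) (hb : b ≤ n) :
    (List.range n).filter (fun j => decide (a ≤ j ∧ j < b)) = List.range' a (b - a) := by
  rcases Nat.le_total b a with hba | hab
  · rw [show b - a = 0 by omega]
    simp only [List.range'_zero]
    rw [List.filter_eq_nil_iff]
    intro j _
    simp only [decide_eq_true_eq]
    omega
  · have e2 : List.range' a (b - a) ++ List.range' b (n - b) = List.range' a ((b - a) + (n - b)) := by
      have := List.range'_append (s := a) (m := b - a) (n := n - b) (step := 1)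
      rwa [show a + 1 * (b - a) = b by omega] at this
    have e1 : List.range' 0 a ++ List.range' a ((b - a) + (n - b)) = List.range' 0 n := by
      have := List.range'_append (s := 0) (m := a) (n := (b - a) + (n - b)) (step := 1)
      rwa [show a + ((b - a) + (n - b)) = n by omega, Nat.zero_add, Nat.one_mul] at this
    rw [List.range_eq_range', ← e1, ← e2, List.filter_append, List.filter_append]
    have f1 : (List.range' 0 a).filter (fun j => decide (a ≤ j ∧ j < b)) = [] := by
      rw [List.filter_eq_nil_iff]
      intro j hj
      have := List.mem_range'_1.1 hj
      simp only [decide_eq_true_eq]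
      omega
    have f2 : (List.range' a (b - a)).filter (fun j => decide (a ≤ j ∧ j < b))
        = List.range' a (b - a) := by
      rw [List.filter_eq_self]
      intro j hj
      have := List.mem_range'_1.1 hj
      simp only [decide_eq_true_eq]
      omega
    have f3 : (List.range' b (n - b)).filter (fun j => decide (a ≤ j ∧ j < b)) = [] := by
      rw [List.filter_eq_nil_iff]
      intro j hj
      have := List.mem_range'_1.1 hj
      simp only [decide_eq_true_eq]
      omega
    rw [f1, f2, f3]
    simp

theorem filter_range'_single (a len m : Nat) (h1 : a ≤ m) (h2 : m < a + len) :
    (List.range' a len).filter (fun j => decide (j = m)) = [m] := by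
  have e1 : List.range' a (m - a) ++ List.range' m (len - (m - a)) = List.range' a len := by
    have := List.range'_append (s := a) (m := m - a) (n := len - (m - a)) (step := 1)
    rwa [show a + 1 * (m - a) = m by omega, show (m - a) + (len - (m - a)) = len by omega] at this
  have e2 : List.range' m (len - (m - a)) = m :: List.range' (m + 1) (len - (m - a) - 1) := by
    conv_lhs => rw [show len - (m - a) = (len - (m - a) - 1) + 1 by omega]
    rw [List.range'_succ]
  rw [← e1, List.filter_append, e2]
  have f1 : (List.range' a (m - a)).filter (fun j => decide (j = m)) = [] := by
    rw [List.filter_eq_nil_iff]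
    intro j hj
    have := List.mem_range'_1.1 hj
    simp only [decide_eq_true_eq]
    omega
  have f3 : (List.range' (m + 1) (len - (m - a) - 1)).filter (fun j => decide (j = m)) = [] := by
    rw [List.filter_eq_nil_iff]
    intro j hj
    have := List.mem_range'_1.1 hj
    simp only [decide_eq_true_eq]
    omega
  rw [f1, List.filter_cons, if_pos (by simp), f3]
  simp

theorem FA_val (rs : List (Int × Nat)) (L : List String)
    (hc : ∀ p ∈ rs, 0 < p.2) (hv : (rs.map (·.1)).Pairwise (· < ·))
    (k : Nat) (hk : k + 1 < rs.length) :
    FA (expandN rs) L (rs.map (·.1)) (k : Int) = PhiN rs L k := by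
  have hklt : k < rs.length := by omega
  have hcpos : 0 < rs[k].2 := hc _ (List.getElem_mem hklt)
  have hncpos : 0 < rs[k + 1].2 := hc _ (List.getElem_mem hk)
  have hn : (expandN rs).length = posN rs rs.length := length_expandN rs
  have hps : posN rs (k + 1) = posN rs k + rs[k].2 := posN_succ rs k hklt
  have hps2 : posN rs (k + 1 + 1) = posN rs (k + 1) + rs[k + 1].2 := posN_succ rs (k + 1) hk
  have hb2 : posN rs (k + 1 + 1) ≤ posN rs rs.length := posN_mono rs (by omega)
  have hleft : PySem.List.pyGetD (rs.map (·.1)) (k : Int) 0 = rs[k].1 := by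
    rw [PySem.List.pyGetD_natCast, List.getD_eq_getElem _ _ (by simpa using hklt)]
    simp
  have hright : PySem.List.pyGetD (rs.map (·.1)) ((k : Int) + 1) 0 = rs[k + 1].1 := by
    rw [show ((k : Int) + 1) = ((k + 1 : Nat) : Int) by push_cast; ring]
    rw [PySem.List.pyGetD_natCast, List.getD_eq_getElem _ _ (by simpa using hk)]
    simp
  rw [FA.eq_def]
  simp only [hleft, hright, PySem.List.slice_to_neg_one, PySem.List.slice_from_one]
  rw [PySem.List.enumerate_eq_map_pyRange _ ((0 : Int), (0 : Int))]
  rw [show PySem.List.len ((expandN rs).dropLast.zip (expandN rs).tail)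
        = (((expandN rs).length - 1 : Nat) : Int) by
    simp [PySem.List.len_eq, List.length_zip, List.length_dropLast, List.length_tail]]
  rw [PySem.List.pyRange_zero_natCast, List.map_map, List.filter_map, List.map_map, List.map_map]
  simp only [Function.comp_def]
  have hpget : ∀ (jn : Nat), jn < (expandN rs).length - 1 →
      PySem.List.pyGetD ((expandN rs).dropLast.zip (expandN rs).tail) ((jn : Nat) : Int) ((0 : Int), (0 : Int))
        = ((expandN rs).getD jn 0, (expandN rs).getD (jn + 1) 0) := by
    intro jn hjn
    rw [PySem.List.pyGetD_natCast]
    rw [List.getD_eq_getElem _ _ (by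
      simp only [List.length_zip, List.length_dropLast, List.length_tail]
      omega)]
    rw [List.getElem_zip]
    rw [List.getD_eq_getElem _ _ (by omega), List.getD_eq_getElem _ _ (by omega)]
    congr 1
    · exact List.getElem_dropLast _
    · exact List.getElem_tail _
  have hov : (List.map (fun j : Nat => (j : Int)) (List.range ((expandN rs).length - 1))).filter
        (fun x => decide ((PySem.List.pyGetD ((expandN rs).dropLast.zip (expandN rs).tail) x ((0:Int), (0:Int))).1 ≥ rs[k].1 ∧
          (PySem.List.pyGetD ((expandN rs).dropLast.zip (expandN rs).tail) x ((0:Int), (0:Int))).2 ≤ rs[k + 1].1))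
      = List.map (fun jn : Nat => (jn : Int)) (List.range' (posN rs k) (rs[k].2 + rs[k + 1].2 - 1)) := by
    rw [List.filter_map]
    simp only [Function.comp_def]
    rw [List.filter_congr (q := fun jn : Nat =>
        decide (posN rs k ≤ jn ∧ jn < posN rs k + rs[k].2 + rs[k + 1].2 - 1)) ?_]
    · rw [filter_range_interval ((expandN rs).length - 1) (posN rs k)
        (posN rs k + rs[k].2 + rs[k + 1].2 - 1) (by omega)]
      rw [show posN rs k + rs[k].2 + rs[k + 1].2 - 1 - posN rs k = rs[k].2 + rs[k + 1].2 - 1 by omega]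
    · intro jn hjn
      have hjn' : jn < (expandN rs).length - 1 := List.mem_range.1 hjn
      rw [hpget jn hjn']
      rw [show (((expandN rs).getD jn 0, (expandN rs).getD (jn + 1) 0) : Int × Int).1
            = (expandN rs).getD jn 0 from rfl]
      rw [List.getD_eq_getElem _ _ (by omega), List.getD_eq_getElem _ _ (by omega)]
      have ka := Ka rs hc hv jn k (by omega) hklt
      have kb := Kb rs hc hv (jn + 1) (k + 1) (by omega) hk
      simp only [ge_iff_le, decide_eq_decide]
      constructor
      · rintro ⟨h1, h2⟩
        have := ka.1 h1
        have := kb.1 h2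
        omega
      · rintro ⟨h1, h2⟩
        exact ⟨ka.2 (by omega), kb.2 (by omega)⟩
  rw [hov]
  simp only [List.map_map, List.map_id, Function.comp_def, PySem.List.pyGetD_natCast]
  have hglen : (List.map (fun jn : Nat => L.getD jn "")
      (List.range' (posN rs k) (rs[k].2 + rs[k + 1].2 - 1))).length
      = rs[k].2 + rs[k + 1].2 - 1 := by simp
  by_cases hone : rs[k].2 + rs[k + 1].2 - 1 = 1
  · rw [if_pos (by rw [hglen]; exact hone)]
    rw [PhiN.eq_def]
    simp only
    rw [if_pos ⟨by rw [List.getD_eq_getElem _ _ hklt]; omega,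
        by rw [List.getD_eq_getElem _ _ hk]; omega⟩]
    rw [hone]
    simp [List.range'_one, PySem.List.pyGetD_zero_cons]
  · rw [if_neg (by rw [hglen]; exact hone)]
    have hnz : (List.map (fun jn : Nat => (jn : Int))
          (List.range' (posN rs k) (rs[k].2 + rs[k + 1].2 - 1))).filter
        (fun j => decide (PySem.List.pyGetD (expandN rs) j 0 ≠ PySem.List.pyGetD (expandN rs) (j + 1) 0))
        = [((posN rs k + rs[k].2 - 1 : Nat) : Int)] := by
      rw [List.filter_map]
      simp only [Function.comp_def]
      rw [List.filter_congr (q := fun jn : Nat => decide (jn = posN rs k + rs[k].2 - 1)) ?_]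
      · rw [filter_range'_single (posN rs k) (rs[k].2 + rs[k + 1].2 - 1)
          (posN rs k + rs[k].2 - 1) (by omega) (by omega)]
        simp
      · intro jn hjn
        have hm := List.mem_range'_1.1 hjn
        have hjn1 : jn + 1 < (expandN rs).length := by omega
        rw [show ((jn : Nat) : Int) + 1 = ((jn + 1 : Nat) : Int) by push_cast; ring]
        rw [PySem.List.pyGetD_natCast, PySem.List.pyGetD_natCast]
        rw [List.getD_eq_getElem _ _ (by omega), List.getD_eq_getElem _ _ (by omega)]
        have kc := Kc rs hc hv jn k hk (by omega)
          (by rw [show k + 2 = k + 1 + 1 by omega]; omega) hjn1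
        simp only [decide_eq_decide]
        exact kc
    rw [hnz]
    rw [if_pos (by simp)]
    rw [PySem.List.pyGetD_zero_cons, PySem.List.pyGetD_natCast]
    have hlast : PySem.List.pyGetD (List.map (fun jn : Nat => L.getD jn "")
          (List.range' (posN rs k) (rs[k].2 + rs[k + 1].2 - 1))) (-1) ""
        = L.getD (posN rs k + rs[k].2 + rs[k + 1].2 - 2) "" := by
      have hne : (List.map (fun jn : Nat => L.getD jn "")
          (List.range' (posN rs k) (rs[k].2 + rs[k + 1].2 - 1))) ≠ [] := by
        simp only [ne_eq, List.map_eq_nil_iff, ← List.length_eq_zero_iff, List.length_range']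
        omega
      rw [PySem.List.pyGetD_neg_one _ _ hne]
      have h1 : (List.map (fun jn : Nat => L.getD jn "")
          (List.range' (posN rs k) (rs[k].2 + rs[k + 1].2 - 1))).getLast?
          = some (L.getD (posN rs k + rs[k].2 + rs[k + 1].2 - 2) "") := by
        conv_lhs => rw [show rs[k].2 + rs[k + 1].2 - 1 = (rs[k].2 + rs[k + 1].2 - 2) + 1 by omega,
          List.range'_concat]
        rw [List.map_append, List.map_singleton, List.getLast?_concat]
        rw [show posN rs k + 1 * (rs[k].2 + rs[k + 1].2 - 2)
              = posN rs k + rs[k].2 + rs[k + 1].2 - 2 by omega]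
      rw [List.getLast?_eq_some_getLast hne] at h1
      exact Option.some.inj h1
    rw [hlast]
    rw [PhiN.eq_def]
    simp only
    rw [if_neg (by
      rw [List.getD_eq_getElem _ _ hklt, List.getD_eq_getElem _ _ hk]
      rintro ⟨h1, h2⟩
      omega)]
    rw [List.getD_eq_getElem _ _ hklt, List.getD_eq_getElem _ _ hk]

theorem foldl_branch_append {α : Type} (l : List α) (C : α → Prop) [DecidablePred C]
    (f g : α → String) (acc : List String) :
    l.foldl (fun acc x => if C x then acc ++ [f x] else acc ++ [g x]) acc
      = acc ++ l.map (fun x => if C x then f x else g x) := by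
  induction l generalizing acc with
  | nil => simp
  | cons x t ih =>
    rw [List.foldl_cons, ih]
    by_cases h : C x
    · simp [h]
    · simp [h]

theorem A_char (e0 : Int) (rest : List Int) (L : List String) :
    consolidate_duplicate_bins (e0 :: rest) L
      = (e0 :: dedupAux e0 rest,
         (PySem.List.pyRange 0 (((e0 :: dedupAux e0 rest).length : Int) - 1) 1).map
           (FA (e0 :: rest) L (e0 :: dedupAux e0 rest))) := by
  rw [consolidate_duplicate_bins.eq_def]
  simp only
  have hu : rest.foldl
      (fun acc e => if PySem.List.pyGetD acc (-1) 0 ≠ e then acc ++ [e] else acc) [e0]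
      = e0 :: dedupAux e0 rest := by
    simpa using foldA_eq rest [] e0
  rw [hu]
  rw [foldl_branch_append _ _ _ _ []]
  rw [List.nil_append]
  rfl

theorem posN_zero (rs : List (Int × Nat)) : posN rs 0 = 0 := rfl

theorem B_fold (rs : List (Int × Nat)) (L : List String) (hc : ∀ p ∈ rs, 0 < p.2) :
    ∀ (t a : Nat) (acc : List String), a + t = rs.length - 1 → 1 ≤ rs.length →
    ((List.range' a t).map (fun x : Nat => (x : Int))).foldl
      (fun (st : List String × Int) k =>
        let pos := st.2
        let c := (PySem.List.pyGetD (rs.map (fun p => (p.1, (p.2 : Int)))) k ((0 : Int), (0 : Int))).2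
        let nc := (PySem.List.pyGetD (rs.map (fun p => (p.1, (p.2 : Int)))) (k + 1) ((0 : Int), (0 : Int))).2
        let j := pos + c - 1
        let labels' :=
          if c = 1 ∧ nc = 1 then
            st.1 ++ [PySem.List.pyGetD L j ""]
          else
            let pre := PySem.List.pyGetD (pySplitU (PySem.List.pyGetD L j "")) 0 ""
            let suf := PySem.List.pyGetD (pySplitU (PySem.List.pyGetD L (pos + c + nc - 2) "")) (-1) ""
            st.1 ++ [pre ++ "_" ++ suf]
        (labels', pos + c)) (acc, ((posN rs a : Nat) : Int))
      = (acc ++ (List.range' a t).map (PhiN rs L), ((posN rs (a + t) : Nat) : Int)) := by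
  intro t
  induction t with
  | zero => intro a acc ht hlen; simp
  | succ t ih =>
    intro a acc ht hlen
    have ha : a < rs.length := by omega
    have ha1 : a + 1 < rs.length := by omega
    have hca : 0 < rs[a].2 := hc _ (List.getElem_mem ha)
    have hca1 : 0 < rs[a + 1].2 := hc _ (List.getElem_mem ha1)
    rw [List.range'_succ, List.map_cons, List.foldl_cons]
    have hgc : PySem.List.pyGetD (rs.map (fun p => (p.1, (p.2 : Int)))) ((a : Nat) : Int) ((0 : Int), (0 : Int))
        = (rs[a].1, (rs[a].2 : Int)) := by
      rw [PySem.List.pyGetD_natCast, List.getD_eq_getElem _ _ (by simpa using ha)]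
      simp
    have hgc1 : PySem.List.pyGetD (rs.map (fun p => (p.1, (p.2 : Int)))) (((a : Nat) : Int) + 1) ((0 : Int), (0 : Int))
        = (rs[a + 1].1, (rs[a + 1].2 : Int)) := by
      rw [show (((a : Nat) : Int) + 1) = ((a + 1 : Nat) : Int) by push_cast; ring]
      rw [PySem.List.pyGetD_natCast, List.getD_eq_getElem _ _ (by simpa using ha1)]
      simp
    simp only [hgc, hgc1]
    have hstep :
        (if ((rs[a].2 : Int) = 1 ∧ (rs[a + 1].2 : Int) = 1) then
            acc ++ [PySem.List.pyGetD L (((posN rs a : Nat) : Int) + (rs[a].2 : Int) - 1) ""]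
          else
            acc ++ [PySem.List.pyGetD (pySplitU (PySem.List.pyGetD L (((posN rs a : Nat) : Int) + (rs[a].2 : Int) - 1) "")) 0 "" ++ "_" ++
              PySem.List.pyGetD (pySplitU (PySem.List.pyGetD L (((posN rs a : Nat) : Int) + (rs[a].2 : Int) + (rs[a + 1].2 : Int) - 2) "")) (-1) ""])
        = acc ++ [PhiN rs L a] := by
      rw [PhiN.eq_def]
      simp only [List.getD_eq_getElem rs (0, 0) ha, List.getD_eq_getElem rs (0, 0) ha1]
      by_cases hcn : rs[a].2 = 1 ∧ rs[a + 1].2 = 1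
      · rw [if_pos (by exact_mod_cast hcn), if_pos hcn]
        obtain ⟨h1, _⟩ := hcn
        rw [h1]
        norm_num
      · rw [if_neg (by exact_mod_cast hcn), if_neg hcn]
        rw [show (((posN rs a : Nat) : Int) + (rs[a].2 : Int) - 1) = ((posN rs a + rs[a].2 - 1 : Nat) : Int) by push_cast [Nat.cast_sub (by omega : 1 ≤ posN rs a + rs[a].2)]; ring]
        rw [show (((posN rs a : Nat) : Int) + (rs[a].2 : Int) + (rs[a + 1].2 : Int) - 2) = ((posN rs a + rs[a].2 + rs[a + 1].2 - 2 : Nat) : Int) by push_cast [Nat.cast_sub (by omega : 2 ≤ posN rs a + rs[a].2 + rs[a + 1].2)]; ring]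
        rw [PySem.List.pyGetD_natCast, PySem.List.pyGetD_natCast]
    simp only [hstep]
    have hpos : ((posN rs a : Nat) : Int) + (rs[a].2 : Int) = ((posN rs (a + 1) : Nat) : Int) := by
      rw [posN_succ rs a ha]; push_cast; ring
    rw [hpos]
    rw [ih (a + 1) (acc ++ [PhiN rs L a]) (by omega) hlen]
    rw [show a + 1 + t = a + (t + 1) by omega]
    simp

theorem B_char (e0 : Int) (rest : List Int) (L : List String)
    (hc : ∀ p ∈ rleNAux e0 1 rest, 0 < p.2) :
    consolidate_duplicate_bins_alt (e0 :: rest) L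
      = ((rleNAux e0 1 rest).map (·.1),
         (List.range' 0 ((rleNAux e0 1 rest).length - 1)).map (PhiN (rleNAux e0 1 rest) L)) := by
  have hlen : 1 ≤ (rleNAux e0 1 rest).length := by
    have := mapfst_rleNAux rest e0 1
    have h2 : ((rleNAux e0 1 rest).map (·.1)).length = (e0 :: dedupAux e0 rest).length := by rw [this]
    simp at h2
    omega
  rw [consolidate_duplicate_bins_alt.eq_def]
  simp only
  have hruns : (e0 :: rest).foldl
      (fun rs e =>
        if rs ≠ [] ∧ (PySem.List.pyGetD rs (-1) ((0 : Int), (0 : Int))).1 = e then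
          rs.dropLast ++ [(e, (PySem.List.pyGetD rs (-1) ((0 : Int), (0 : Int))).2 + 1)]
        else rs ++ [(e, 1)]) ([] : List (Int × Int))
      = (rleNAux e0 1 rest).map (fun p => (p.1, (p.2 : Int))) := by
    rw [List.foldl_cons]
    have h1 := foldB_eq rest [] e0 1
    simpa using h1
  rw [hruns]
  rw [List.map_map]
  have hulen : ((rleNAux e0 1 rest).map (fun p => (p.1, (p.2 : Int)))).length
      = (rleNAux e0 1 rest).length := by simp
  rw [hulen]
  rw [show (((rleNAux e0 1 rest).length : Int) - 1) = (((rleNAux e0 1 rest).length - 1 : Nat) : Int) by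
    push_cast [Nat.cast_sub hlen]; ring]
  rw [PySem.List.pyRange_zero_natCast, List.range_eq_range']
  have hfold := B_fold (rleNAux e0 1 rest) L hc ((rleNAux e0 1 rest).length - 1) 0 [] (by omega) hlen
  rw [posN_zero] at hfold
  rw [show ((0 : Nat) : Int) = (0 : Int) by norm_num] at hfold
  rw [hfold]
  simp

theorem two_elem (e0 e1 : Int) (L : List String) (h : ¬ e0 ≤ e1) :
    consolidate_duplicate_bins [e0, e1] L = consolidate_duplicate_bins_alt [e0, e1] L := by
  have hne : e0 ≠ e1 := by omega
  have hu : List.foldl (fun acc e => if PySem.List.pyGetD acc (-1) 0 ≠ e then acc ++ [e] else acc)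
      [e0] [e1] = [e0, e1] := by
    rw [List.foldl_cons, List.foldl_nil, if_pos (by simp [pysem]; exact hne)]
    rfl
  have hr : List.foldl (fun rs e =>
      if rs ≠ [] ∧ (PySem.List.pyGetD rs (-1) ((0 : Int), (0 : Int))).1 = e then
        rs.dropLast ++ [(e, (PySem.List.pyGetD rs (-1) ((0 : Int), (0 : Int))).2 + 1)]
      else rs ++ [(e, 1)]) ([] : List (Int × Int)) [e0, e1]
      = [(e0, 1), (e1, 1)] := by
    rw [show List.foldl (fun rs e =>
        if rs ≠ [] ∧ (PySem.List.pyGetD rs (-1) ((0 : Int), (0 : Int))).1 = e then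
          rs.dropLast ++ [(e, (PySem.List.pyGetD rs (-1) ((0 : Int), (0 : Int))).2 + 1)]
        else rs ++ [(e, 1)]) ([] : List (Int × Int)) [e0, e1]
      = List.foldl (fun rs e =>
        if rs ≠ [] ∧ (PySem.List.pyGetD rs (-1) ((0 : Int), (0 : Int))).1 = e then
          rs.dropLast ++ [(e, (PySem.List.pyGetD rs (-1) ((0 : Int), (0 : Int))).2 + 1)]
        else rs ++ [(e, 1)]) ([(e0, 1)] : List (Int × Int)) [e1] from rfl]
    rw [List.foldl_cons, List.foldl_nil]
    rw [if_neg (by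
      rintro ⟨-, hx⟩
      rw [PySem.List.pyGetD_neg_one _ _ (by simp)] at hx
      simp at hx
      exact hne hx)]
    rfl
  rw [consolidate_duplicate_bins.eq_def, consolidate_duplicate_bins_alt.eq_def]
  simp only [hu, hr]
  rw [show ((([e0, e1] : List Int).length : Int) - 1) = 1 by simp]
  rw [show ((([(e0, 1), (e1, 1)] : List (Int × Int)).length : Int) - 1) = 1 by simp]
  rw [show PySem.List.pyRange 0 1 1 = [0] from by decide]
  rw [List.foldl_cons, List.foldl_nil, List.foldl_cons, List.foldl_nil]
  have hov2 : List.filter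
      (fun p => decide (p.2.1 ≥ PySem.List.pyGetD [e0, e1] 0 0 ∧ p.2.2 ≤ PySem.List.pyGetD [e0, e1] (0 + 1) 0))
      (PySem.List.enumerate ((PySem.List.slice [e0, e1] none (some (-1))).zip (PySem.List.slice [e0, e1] (some 1))))
      = [((0 : Int), (e0, e1))] := by
    rw [show PySem.List.pyGetD [e0, e1] 0 0 = e0 from rfl]
    rw [show ((0 : Int) + 1) = 1 from rfl]
    rw [show PySem.List.pyGetD [e0, e1] 1 0 = e1 from rfl]
    rw [PySem.List.slice_to_neg_one, PySem.List.slice_from_one]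
    rw [show ([e0, e1] : List Int).dropLast = [e0] from rfl]
    rw [show ([e0, e1] : List Int).tail = [e1] from rfl]
    rw [show ([e0].zip [e1] : List (Int × Int)) = [(e0, e1)] from rfl]
    rw [show PySem.List.enumerate [(e0, e1)] = [((0 : Int), (e0, e1))] from rfl]
    simp
  rw [hov2]
  rfl

-- ===== VERDICT (by name: the statement is the Claim_ definition above) =====
theorem consolidate_duplicate_bins_spec : Claim_equal_consolidate_duplicate_bins := by
  intro E L hdom hpre
  unfold Spec_consolidate_duplicate_bins
  obtain ⟨hne, hsorted, -⟩ := hpre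
  cases E with
  | nil => exact absurd rfl hne
  | cons e0 rest =>
    by_cases hs : List.Pairwise (· ≤ ·) (e0 :: rest)
    case neg =>
      rcases hsorted with hsort | hlen2
      · exact absurd hsort hs
      · cases rest with
        | nil => exact absurd (by simp) hs
        | cons e1 rest2 =>
          cases rest2 with
          | cons x t =>
            exfalso
            have hl : (e0 :: e1 :: x :: t).length = t.length + 3 := by simp
            omega
          | nil =>
            have h01 : ¬ e0 ≤ e1 := by
              intro hle
              exact hs (by simp [hle])
            exact two_elem e0 e1 L h01
    case pos =>
    have hc := counts_pos_rleNAux rest e0 1 (by omega)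
    have hmapfst := mapfst_rleNAux rest e0 1
    have hE : expandN (rleNAux e0 1 rest) = e0 :: rest := by
      simpa using expandN_rleNAux rest e0 1
    have hchain : List.IsChain (· ≤ ·) (e0 :: rest) := List.isChain_iff_pairwise.2 hs
    have hv : ((rleNAux e0 1 rest).map (·.1)).Pairwise (· < ·) := by
      rw [hmapfst]
      exact List.isChain_iff_pairwise.1 (chain_lt_dedupAux rest e0 hchain)
    have hlen : (e0 :: dedupAux e0 rest).length = (rleNAux e0 1 rest).length := by
      rw [← hmapfst]; simp
    have hlen1 : 1 ≤ (rleNAux e0 1 rest).length := by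
      rw [← hlen]; simp
    rw [A_char, B_char e0 rest L hc, Prod.mk.injEq]
    constructor
    · exact hmapfst.symm
    · rw [show (((e0 :: dedupAux e0 rest).length : Int) - 1)
          = (((rleNAux e0 1 rest).length - 1 : Nat) : Int) by
        rw [hlen]; push_cast [Nat.cast_sub hlen1]; ring]
      rw [PySem.List.pyRange_zero_natCast, List.range_eq_range', List.map_map]
      apply List.map_congr_left
      intro kn hkn
      have hkn' : kn < (rleNAux e0 1 rest).length - 1 := by
        have := List.mem_range'_1.1 hkn; omega
      have := FA_val (rleNAux e0 1 rest) L hc hv kn (by omega)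
      rw [hE, hmapfst] at this
      simpa using this
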